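-- pv_equiv track=rewrite | github.com/STEZXE-DEV/COLLEGE-PROJECTS | python/zadania 07.01.25/zad3-SJ6.py | deszyfrowanie
-- ===== SOURCE A (Python) =====
-- litery = {
--     'A': 0, 'B': 1, 'C': 2, 'D': 3, 'E': 4,
--     'F': 5, 'G': 6, 'H': 7, 'I': 8, 'J': 9,
--     'K': 10, 'L': 11, 'M': 12, 'N': 13, 'O': 14,
--     'P': 15, 'Q': 16, 'R': 17, 'S': 18, 'T': 19,
--     'U': 20, 'V': 21, 'W': 22, 'X': 23, 'Y': 24, 'Z': 25
-- }
--
-- def deszyfrowanie(a):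
--     x=[]
--     y=[]
--     for j in range(1,26):
--         for i in a:
--             if i==" ":
--                 x.append(i)
--             if i in litery.keys():
--                 x.append((litery[i]-j)%26)
--         x.append(",")
--     for i in x:
--         if i == " " or i == ",":
--             y.append(i)
--         for k,v in litery.items():
--             if i == v:
--                 y.append(k)
--     y.pop()
--     tekst=''.join(y)
--     wyniki=tekst.split(",")
--     return wyniki
-- ===== SOURCE B (Python) =====
-- def deszyfrowanie(a):
--     wyniki = []
--     for j in range(1, 26):
--         s = []
--         for c in a:
--             if c == " ":
--                 s.append(" ")
--             elif "A" <= c <= "Z":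
--                 s.append(chr(65 + (ord(c) - 65 - j) % 26))
--         wyniki.append("".join(s))
--     return wyniki
-- ===== Notes on version B (the rewrite author's own statement) =====
-- stated objective: simpler
-- what changed: B builds each of the 25 decrypted strings directly in one pass per shift with chr arithmetic, removing A's flat numeric intermediate list with comma sentinels, its per-element scan of litery.items() for decoding, the pop() and the join/split round-trip.
import Mathlib
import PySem

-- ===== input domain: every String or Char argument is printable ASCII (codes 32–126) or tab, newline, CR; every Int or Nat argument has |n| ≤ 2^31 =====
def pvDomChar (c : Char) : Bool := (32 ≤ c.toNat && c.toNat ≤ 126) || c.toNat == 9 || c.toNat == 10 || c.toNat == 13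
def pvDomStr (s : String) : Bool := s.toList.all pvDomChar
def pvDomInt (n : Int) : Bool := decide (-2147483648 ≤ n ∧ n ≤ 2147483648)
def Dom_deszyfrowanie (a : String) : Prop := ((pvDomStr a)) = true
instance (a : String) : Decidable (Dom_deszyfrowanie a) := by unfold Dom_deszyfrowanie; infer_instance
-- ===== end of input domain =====

-- B replaces A's flat numeric list with comma sentinels, reverse dict-scan decoding, pop() and
-- join/split by building each of the 25 per-shift strings directly (objective: simpler).

-- ===== PORT A =====
-- the module-level dict 'litery'
def litery : PySem.Dict Char Int := PySem.Dict.mk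
  [('A', 0), ('B', 1), ('C', 2), ('D', 3), ('E', 4),
   ('F', 5), ('G', 6), ('H', 7), ('I', 8), ('J', 9),
   ('K', 10), ('L', 11), ('M', 12), ('N', 13), ('O', 14),
   ('P', 15), ('Q', 16), ('R', 17), ('S', 18), ('T', 19),
   ('U', 20), ('V', 21), ('W', 22), ('X', 23), ('Y', 24), ('Z', 25)]

-- elements of A's heterogeneous list x: the string " ", the string ",", or an int
inductive XEl
  | sp
  | comma
  | num (n : Int)
deriving DecidableEq, Repr

def deszyfrowanie (a : String) : List String :=
  let x : List XEl := (PySem.List.pyRange 1 26 1).foldl (fun x j =>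
    (a.toList.foldl (fun x i =>
      let x := if i = ' ' then x ++ [XEl.sp] else x
      -- 'if i in litery.keys(): x.append((litery[i]-j)%26)'
      match PySem.Dict.get? litery i with
      | some v => x ++ [XEl.num (PySem.Int.mod (v - j) 26)]
      | none => x) x) ++ [XEl.comma]) []
  let y : List Char := x.foldl (fun y i =>
    -- 'if i == " " or i == ",": y.append(i)'
    let y := if i = XEl.sp then y ++ [' '] else if i = XEl.comma then y ++ [','] else y
    litery.items.foldl (fun y kv => if i = XEl.num kv.2 then y ++ [kv.1] else y) y) []
  -- y.pop(): y always contains the 25 ',' sentinels, so it is nonempty and pop drops the last element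
  let tekst : List Char := y.dropLast
  -- ''.join(y) followed by tekst.split(","): each y element is a single character
  (PySem.Chars.splitOn tekst [',']).map String.ofList

-- ===== PORT B =====
def deszyfrowanie_alt (a : String) : List String :=
  (PySem.List.pyRange 1 26 1).foldl (fun wyniki j =>
    wyniki ++ [String.ofList (a.toList.foldl (fun s c =>
      if c = ' ' then s ++ [' ']
      else if 'A' ≤ c ∧ c ≤ 'Z' then
        s ++ [Char.ofNat (65 + PySem.Int.mod ((c.toNat : Int) - 65 - j) 26).toNat]
      else s) [])]) []

-- ===== PRECONDITION & SPEC =====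
def Spec_deszyfrowanie (a : String) (out : List String) : Prop := out = deszyfrowanie_alt a
instance (a : String) (out : List String) : Decidable (Spec_deszyfrowanie a out) := by unfold Spec_deszyfrowanie; infer_instance

-- ===== CLAIM (what is proved, stated in full; the proofs are below) =====
def Claim_equal_deszyfrowanie : Prop := ∀ (a : String), Dom_deszyfrowanie a → Spec_deszyfrowanie a (deszyfrowanie a)

-- ===== LEMMAS AND PROOFS =====

-- per-character encoding step of A's first loop (for one shift j)
def eA (j : Int) (c : Char) : List XEl :=
  (if c = ' ' then [XEl.sp] else []) ++
  (match PySem.Dict.get? litery c with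
   | some v => [XEl.num (PySem.Int.mod (v - j) 26)]
   | none => [])

-- per-element decoding step of A's second loop
def dEl (i : XEl) : List Char :=
  (if i = XEl.sp then [' '] else if i = XEl.comma then [','] else []) ++
  litery.items.flatMap (fun kv => if i = XEl.num kv.2 then [kv.1] else [])

-- per-character step of B's inner loop
def eB (j : Int) (c : Char) : List Char :=
  if c = ' ' then [' ']
  else if 'A' ≤ c ∧ c ≤ 'Z' then
    [Char.ofNat (65 + PySem.Int.mod ((c.toNat : Int) - 65 - j) 26).toNat]
  else []

lemma foldA_inner (j : Int) (l : List Char) (x0 : List XEl) :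
    l.foldl (fun x i =>
      let x := if i = ' ' then x ++ [XEl.sp] else x
      match PySem.Dict.get? litery i with
      | some v => x ++ [XEl.num (PySem.Int.mod (v - j) 26)]
      | none => x) x0 = x0 ++ l.flatMap (eA j) := by
  have h : (fun (x : List XEl) i =>
      let x := if i = ' ' then x ++ [XEl.sp] else x
      match PySem.Dict.get? litery i with
      | some v => x ++ [XEl.num (PySem.Int.mod (v - j) 26)]
      | none => x) = fun x i => x ++ eA j i := by
    funext x i
    simp only [eA]
    cases PySem.Dict.get? litery i <;> split_ifs <;> simp
  rw [h, PySem.List.foldl_append_eq_flatMap]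

lemma foldA_outer (a : String) :
    (PySem.List.pyRange 1 26 1).foldl (fun x j =>
      (a.toList.foldl (fun x i =>
        let x := if i = ' ' then x ++ [XEl.sp] else x
        match PySem.Dict.get? litery i with
        | some v => x ++ [XEl.num (PySem.Int.mod (v - j) 26)]
        | none => x) x) ++ [XEl.comma]) [] =
    (PySem.List.pyRange 1 26 1).flatMap (fun j => a.toList.flatMap (eA j) ++ [XEl.comma]) := by
  have h : (fun (x : List XEl) j =>
      (a.toList.foldl (fun x i =>
        let x := if i = ' ' then x ++ [XEl.sp] else x
        match PySem.Dict.get? litery i with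
        | some v => x ++ [XEl.num (PySem.Int.mod (v - j) 26)]
        | none => x) x) ++ [XEl.comma]) =
      fun x j => x ++ (a.toList.flatMap (eA j) ++ [XEl.comma]) := by
    funext x j
    rw [foldA_inner]
    simp
  rw [h, PySem.List.foldl_append_eq_flatMap]
  simp

lemma foldDec (l : List XEl) (y0 : List Char) :
    l.foldl (fun y i =>
      let y := if i = XEl.sp then y ++ [' '] else if i = XEl.comma then y ++ [','] else y
      litery.items.foldl (fun y kv => if i = XEl.num kv.2 then y ++ [kv.1] else y) y) y0 =
    y0 ++ l.flatMap dEl := by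
  have h : (fun (y : List Char) i =>
      let y := if i = XEl.sp then y ++ [' '] else if i = XEl.comma then y ++ [','] else y
      litery.items.foldl (fun y kv => if i = XEl.num kv.2 then y ++ [kv.1] else y) y) =
      fun y i => y ++ dEl i := by
    funext y i
    simp only [dEl]
    have hin : ∀ (y1 : List Char),
        litery.items.foldl (fun y kv => if i = XEl.num kv.2 then y ++ [kv.1] else y) y1 =
        y1 ++ litery.items.flatMap (fun kv => if i = XEl.num kv.2 then [kv.1] else []) := by
      intro y1
      have h2 : (fun (y : List Char) (kv : Char × Int) =>
          if i = XEl.num kv.2 then y ++ [kv.1] else y) =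
          fun y kv => y ++ (if i = XEl.num kv.2 then [kv.1] else []) := by
        funext y kv; split_ifs <;> simp
      rw [h2, PySem.List.foldl_append_eq_flatMap]
    rw [hin]
    split_ifs <;> simp
  rw [h, PySem.List.foldl_append_eq_flatMap]

lemma foldB_inner (j : Int) (l : List Char) (s0 : List Char) :
    l.foldl (fun s c =>
      if c = ' ' then s ++ [' ']
      else if 'A' ≤ c ∧ c ≤ 'Z' then
        s ++ [Char.ofNat (65 + PySem.Int.mod ((c.toNat : Int) - 65 - j) 26).toNat]
      else s) s0 = s0 ++ l.flatMap (eB j) := by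
  have h : (fun (s : List Char) c =>
      if c = ' ' then s ++ [' ']
      else if 'A' ≤ c ∧ c ≤ 'Z' then
        s ++ [Char.ofNat (65 + PySem.Int.mod ((c.toNat : Int) - 65 - j) 26).toNat]
      else s) = fun s c => s ++ eB j c := by
    funext s c; simp only [eB]; split_ifs <;> simp
  rw [h, PySem.List.foldl_append_eq_flatMap]

lemma alt_eq_map (a : String) :
    deszyfrowanie_alt a =
    (PySem.List.pyRange 1 26 1).map (fun j => String.ofList (a.toList.flatMap (eB j))) := by
  unfold deszyfrowanie_alt
  have h : (fun (wyniki : List String) (j : Int) =>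
      wyniki ++ [String.ofList (a.toList.foldl (fun s c =>
        if c = ' ' then s ++ [' ']
        else if 'A' ≤ c ∧ c ≤ 'Z' then
          s ++ [Char.ofNat (65 + PySem.Int.mod ((c.toNat : Int) - 65 - j) 26).toNat]
        else s) [])]) =
      fun wyniki j => wyniki ++ [String.ofList (a.toList.flatMap (eB j))] := by
    funext w j; rw [foldB_inner]; simp
  rw [h, PySem.List.foldl_append_singleton_eq_map]
  simp

-- decoding one numeric element: the reverse scan of litery finds exactly the letter with code 65+n
lemma decode_num (n : Int) (h0 : 0 ≤ n) (h26 : n < 26) :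
    dEl (XEl.num n) = [Char.ofNat (65 + n).toNat] := by
  have hn : n = (n.toNat : Int) := (Int.toNat_of_nonneg h0).symm
  have hlt : n.toNat < 26 := by omega
  rw [hn]
  set m := n.toNat with hm
  clear_value m
  clear hn hm h0 h26
  interval_cases m <;> decide

lemma decode_comma : dEl XEl.comma = [','] := by decide

lemma le_A_iff (c : Char) : 'A' ≤ c ↔ 65 ≤ c.toNat := by
  rw [Char.le_def, UInt32.le_iff_toNat_le]; rfl

lemma le_Z_iff (c : Char) : c ≤ 'Z' ↔ c.toNat ≤ 90 := by
  rw [Char.le_def, UInt32.le_iff_toNat_le]; rfl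

lemma get?_letter (c : Char) (h1 : 65 ≤ c.toNat) (h2 : c.toNat ≤ 90) :
    PySem.Dict.get? litery c = some ((c.toNat : Int) - 65) := by
  have hc : Char.ofNat c.toNat = c := Char.ofNat_toNat c
  set n := c.toNat with hn
  clear_value n
  rw [← hc]
  clear hn hc
  interval_cases n <;> decide

lemma bounds_of_get?_isSome (c : Char) (h : (PySem.Dict.get? litery c).isSome = true) :
    65 ≤ c.toNat ∧ c.toNat ≤ 90 := by
  rw [PySem.Dict.get?] at h
  cases hf : List.find? (fun p => p.1 == c) litery.items with
  | none => rw [hf] at h; simp at h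
  | some p =>
    have hmem := List.mem_of_find?_eq_some hf
    have heq : p.1 = c := by
      have := List.find?_some hf
      simpa using this
    have hc : c ∈ litery.items.map Prod.fst := heq ▸ List.mem_map_of_mem hmem
    simp only [litery, List.map_cons, List.map_nil, List.mem_cons, List.not_mem_nil, or_false] at hc
    obtain (rfl|rfl|rfl|rfl|rfl|rfl|rfl|rfl|rfl|rfl|rfl|rfl|rfl|rfl|rfl|rfl|rfl|rfl|rfl|rfl|rfl|rfl|rfl|rfl|rfl|rfl) := hc <;> decide

lemma get?_none (c : Char) (h : ¬ (65 ≤ c.toNat ∧ c.toNat ≤ 90)) :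
    PySem.Dict.get? litery c = none := by
  cases hg : PySem.Dict.get? litery c with
  | none => rfl
  | some v => exact absurd (bounds_of_get?_isSome c (by rw [hg]; rfl)) h

-- the per-character correspondence: decoding A's encoding of c gives B's output for c
lemma char_lemma (j : Int) (c : Char) : (eA j c).flatMap dEl = eB j c := by
  by_cases hsp : c = ' '
  · subst hsp
    have hg : PySem.Dict.get? litery ' ' = none := by decide
    have hd : List.flatMap dEl [XEl.sp] = [' '] := by decide
    have hnl : ¬('A' ≤ ' ' ∧ ' ' ≤ 'Z') := by decide
    simp [eA, eB, hg, hd]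
  · by_cases hl : 'A' ≤ c ∧ c ≤ 'Z'
    · have h1 : 65 ≤ c.toNat := (le_A_iff c).mp hl.1
      have h2 : c.toNat ≤ 90 := (le_Z_iff c).mp hl.2
      have hg := get?_letter c h1 h2
      have hnn := PySem.Int.mod_nonneg ((c.toNat : Int) - 65 - j) (by omega : (0:Int) < 26)
      have hlt := PySem.Int.mod_lt ((c.toNat : Int) - 65 - j) (by omega : (0:Int) < 26)
      simp only [eA, eB, hg, if_neg hsp, if_pos hl, List.nil_append, List.flatMap_cons,
        List.flatMap_nil, List.append_nil]
      rw [decode_num _ hnn hlt]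
    · have hg : PySem.Dict.get? litery c = none := by
        refine get?_none c fun hb => hl ⟨(le_A_iff c).mpr hb.1, (le_Z_iff c).mpr hb.2⟩
      simp [eA, eB, hsp, hl, hg]

-- B's segment for shift j contains no comma
lemma comma_not_mem (j : Int) (l : List Char) : ',' ∉ l.flatMap (eB j) := by
  intro hmem
  obtain ⟨c, _, hc⟩ := List.mem_flatMap.mp hmem
  simp only [eB] at hc
  split_ifs at hc with h1 h2
  · simp at hc
  · simp only [List.mem_singleton] at hc
    have h1 : 65 ≤ c.toNat := (le_A_iff c).mp h2.1
    have hnn := PySem.Int.mod_nonneg ((c.toNat : Int) - 65 - j) (by omega : (0:Int) < 26)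
    have hlt := PySem.Int.mod_lt ((c.toNat : Int) - 65 - j) (by omega : (0:Int) < 26)
    have := congrArg Char.toNat hc.symm
    rw [Char.toNat_ofNat] at this
    have hval : ((65 : Int) + PySem.Int.mod ((c.toNat : Int) - 65 - j) 26).toNat.isValidChar := by
      constructor; omega
    rw [if_pos hval] at this
    rw [show ','.toNat = 44 from rfl] at this
    omega
  · simp at hc

-- comma-join of a nonempty list of segments (the shape of y after the final pop)
def joinC (s : List Char) (segs : List (List Char)) : List Char :=
  match segs with
  | [] => s
  | t :: r => s ++ ',' :: joinC t r

lemma flatMap_comma_dropLast (s : List Char) (segs : List (List Char)) :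
    ((s :: segs).flatMap (fun t => t ++ [','])).dropLast = joinC s segs := by
  induction segs generalizing s with
  | nil => simp [joinC]
  | cons t r ih =>
    have : ((s :: t :: r).flatMap (fun t => t ++ [','])) =
        (s ++ [',']) ++ (t :: r).flatMap (fun t => t ++ [',']) := by simp
    rw [this, joinC]
    have hne : (t :: r).flatMap (fun t => t ++ [',']) ≠ [] := by
      simp
    rw [List.dropLast_append_of_ne_nil hne]
    rw [ih t]
    simp

-- splitOn.go over a comma-free segment
lemma go_seg (seg : List Char) (h : ',' ∉ seg) :
    ∀ (fuel : Nat) (rest cur : List Char) (acc : List (List Char)),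
    PySem.Chars.splitOn.go [','] (seg.length + fuel + 1) (seg ++ rest) cur acc =
    PySem.Chars.splitOn.go [','] (fuel + 1) rest (seg.reverse ++ cur) acc := by
  induction seg with
  | nil => intro fuel rest cur acc; simp
  | cons c t ih =>
    intro fuel rest cur acc
    have hc : c ≠ ',' := fun hh => h (hh ▸ List.mem_cons_self)
    have ht : ',' ∉ t := fun hh => h (List.mem_cons_of_mem _ hh)
    rw [show (c :: t).length + fuel + 1 = (t.length + fuel + 1) + 1 by simp; omega]
    rw [List.cons_append, PySem.Chars.splitOn.go.eq_def]
    simp only [List.isPrefixOf, Bool.and_true]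
    rw [if_neg (by simp; exact fun hh => hc hh.symm)]
    rw [ih ht (fuel := fuel) (rest := rest) (cur := c :: cur) (acc := acc)]
    simp

lemma go_join : ∀ (segs : List (List Char)) (s : List Char),
    (∀ t ∈ s :: segs, ',' ∉ t) → ∀ (acc : List (List Char)) (fuel : Nat),
    PySem.Chars.splitOn.go [','] ((joinC s segs).length + fuel + 1) (joinC s segs) [] acc =
    acc.reverse ++ s :: segs := by
  intro segs
  induction segs with
  | nil =>
    intro s h acc fuel
    simp only [joinC]
    have := go_seg s (h s List.mem_cons_self) fuel [] [] acc
    rw [show s ++ ([] : List Char) = s by simp] at this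
    rw [this, PySem.Chars.splitOn.go.eq_def]
    simp
  | cons t r ih =>
    intro s h acc fuel
    simp only [joinC]
    rw [show (s ++ ',' :: joinC t r).length + fuel + 1
        = s.length + ((joinC t r).length + fuel + 1) + 1 by
      simp only [List.length_append, List.length_cons]; omega]
    rw [show s ++ ',' :: joinC t r = s ++ (',' :: joinC t r) by rfl]
    rw [go_seg s (h s List.mem_cons_self) _ (',' :: joinC t r) [] acc]
    rw [PySem.Chars.splitOn.go.eq_def]
    simp only [List.isPrefixOf, Bool.and_true, beq_self_eq_true, if_pos, List.length_cons,
      List.drop_succ_cons]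
    have hstep := ih t (fun u hu => h u (List.mem_cons_of_mem _ hu)) (s :: acc) fuel
    simp only [List.append_nil, List.reverse_reverse, List.length_nil, List.drop_zero]
    rw [hstep]
    simp

lemma splitOn_joinC (s : List Char) (segs : List (List Char))
    (h : ∀ t ∈ s :: segs, ',' ∉ t) :
    PySem.Chars.splitOn (joinC s segs) [','] = s :: segs := by
  rw [PySem.Chars.splitOn]
  have := go_join segs s h [] 0
  simpa using this

-- ===== VERDICT (by name: the statement is the Claim_ definition above) =====
theorem deszyfrowanie_spec : Claim_equal_deszyfrowanie := by
  intro a _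
  unfold Spec_deszyfrowanie
  simp only [deszyfrowanie]
  rw [foldA_outer, foldDec]
  simp only [List.nil_append]
  rw [List.flatMap_assoc]
  have hseg : (fun j => List.flatMap dEl (a.toList.flatMap (eA j) ++ [XEl.comma])) =
      fun j => a.toList.flatMap (eB j) ++ [','] := by
    funext j
    rw [List.flatMap_append, List.flatMap_assoc]
    simp only [char_lemma]
    simp [decode_comma]
  rw [hseg]
  rw [← List.flatMap_map (fun j => a.toList.flatMap (eB j)) (fun t => t ++ [','])
    (PySem.List.pyRange 1 26 1)]
  obtain ⟨s, segs, hL⟩ : ∃ s segs,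
      (PySem.List.pyRange 1 26 1).map (fun j => a.toList.flatMap (eB j)) = s :: segs := by
    cases hL : (PySem.List.pyRange 1 26 1).map (fun j => a.toList.flatMap (eB j)) with
    | nil =>
      exfalso
      have := congrArg List.length hL
      simp at this
    | cons s segs => exact ⟨s, segs, rfl⟩
  have hcf : ∀ t ∈ s :: segs, ',' ∉ t := by
    rw [← hL]
    intro t ht
    obtain ⟨j, _, rfl⟩ := List.mem_map.mp ht
    exact comma_not_mem j _
  rw [hL, flatMap_comma_dropLast, splitOn_joinC s segs hcf]
  rw [alt_eq_map]
  have : (PySem.List.pyRange 1 26 1).map (fun j => String.ofList (a.toList.flatMap (eB j))) =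
      ((PySem.List.pyRange 1 26 1).map (fun j => a.toList.flatMap (eB j))).map String.ofList := by
    rw [List.map_map]; rfl
  rw [this, hL]
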